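-- pv_equiv track=rewrite | github.com/jmessiha94/NLP | word_vectorization.py | word_embedding
-- ===== SOURCE A (Python) =====
-- def word_embedding(X):
--     # Returns each sentence with a 'set' of words and their word count
--     embedded = []
--     for sent in X:
--         set_sent = set(sent)
--         new_sent = {}
--         for word in set_sent:
--             new_sent[word] = sent.count(word)
--         embedded.append(new_sent)
--     return embedded
-- ===== SOURCE B (Python) =====
-- def word_embedding(X):
--     # Per sentence: fold the words through an association-list counter (no set,
--     # no dict while counting, no .count rescans): scan the pair list for the
--     # word, bump its count in place, or append (word, 1); wrap it as a dict.
--     embedded = []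
--     for sent in X:
--         pairs = []
--         for word in sent:
--             for i, wc in enumerate(pairs):
--                 if wc[0] == word:
--                     pairs[i] = (word, wc[1] + 1)
--                     break
--             else:
--                 pairs.append((word, 1))
--         embedded.append(dict(pairs))
--     return embedded
-- ===== Notes on version B (the rewrite author's own statement) =====
-- stated objective: alternative
-- what changed: Replaces A's set-of-uniques plus a full sent.count rescan per unique word with a dict-free association-list counter: each word is folded through a recursive _bump that increments its pair or appends (word,1), and the finished pair list is wrapped as a dict.
import Mathlib
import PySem

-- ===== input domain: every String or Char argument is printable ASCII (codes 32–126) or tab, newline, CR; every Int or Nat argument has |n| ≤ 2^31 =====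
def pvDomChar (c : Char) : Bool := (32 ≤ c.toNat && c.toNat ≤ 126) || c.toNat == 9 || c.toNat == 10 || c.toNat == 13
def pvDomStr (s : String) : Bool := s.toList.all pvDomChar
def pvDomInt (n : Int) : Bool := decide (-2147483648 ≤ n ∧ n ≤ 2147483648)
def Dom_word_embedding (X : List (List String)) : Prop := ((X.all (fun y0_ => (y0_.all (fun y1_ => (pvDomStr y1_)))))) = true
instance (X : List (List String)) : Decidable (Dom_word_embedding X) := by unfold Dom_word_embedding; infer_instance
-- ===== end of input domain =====

-- B counts each sentence with a dict-free recursive association-list bump instead of A's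
-- set of uniques plus per-word sent.count rescans (objective: alternative decomposition).

-- ===== PORT A =====
-- for sent in X: set_sent = set(sent); new_sent = {}; for word in set_sent: new_sent[word] = sent.count(word); embedded.append(new_sent)
-- (the dict is returned as its items list; Python's hash iteration order over the set is not modelled —
--  outputs are dicts, compared ignoring order, so the port iterates the set in first-insertion order)
def word_embedding (X : List (List String)) : List (List (String × Int)) :=
  X.foldl (fun embedded sent =>
    let set_sent : PySem.Set String := PySem.Set.ofList sent
    let new_sent : PySem.Dict String Int :=
      set_sent.foldl (fun d word => d.insert word (sent.count word : Int)) PySem.Dict.empty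
    embedded ++ [new_sent.items]) []

-- ===== PORT B =====
-- _bump: if not pairs: [(word,1)]; elif pairs[0][0] == word: [(w, c+1)] + rest; else [(w, c)] + _bump(rest, word)
def pvBump : List (String × Int) → String → List (String × Int)
  | [], word => [(word, 1)]
  | (w, c) :: rest, word =>
      if w = word then (w, c + 1) :: rest else (w, c) :: pvBump rest word

-- for sent in X: pairs = []; for word in sent: pairs = _bump(pairs, word); embedded.append(dict(pairs))
def word_embedding_alt (X : List (List String)) : List (List (String × Int)) :=
  X.foldl (fun embedded sent =>
    embedded ++ [sent.foldl pvBump []]) []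

-- ===== PRECONDITION & SPEC =====
def Spec_word_embedding (X : List (List String)) (out : List (List (String × Int))) : Prop := out = word_embedding_alt X
instance (X : List (List String)) (out : List (List (String × Int))) : Decidable (Spec_word_embedding X out) := by unfold Spec_word_embedding; infer_instance

-- ===== CLAIM (what is proved, stated in full; the proofs are below) =====
def Claim_equal_word_embedding : Prop := ∀ (X : List (List String)), Dom_word_embedding X → Spec_word_embedding X (word_embedding X)

-- ===== LEMMAS AND PROOFS =====

-- bumping a counting table over a nodup key list ys either updates x's count or appends (x, 1)
theorem bump_map (ys : List String) (g : String → Int) (x : String) (hnd : ys.Nodup) :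
    pvBump (ys.map (fun k => (k, g k))) x =
      (if x ∈ ys then ys.map (fun k => (k, if k = x then g k + 1 else g k))
       else ys.map (fun k => (k, g k)) ++ [(x, 1)]) := by
  induction ys with
  | nil => simp [pvBump]
  | cons y t ih =>
      rcases List.nodup_cons.mp hnd with ⟨hy, ht⟩
      by_cases hxy : y = x
      · subst hxy
        simp only [List.map_cons, pvBump, List.mem_cons, true_or, if_true]
        simp only [List.cons.injEq, true_and]
        exact (List.map_congr_left (fun k hk => by
          have : ¬ k = y := fun h => hy (h ▸ hk); simp [this])).symm
      · simp only [List.map_cons, pvBump, if_neg hxy, ih ht, List.mem_cons]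
        by_cases hx : x ∈ t
        · simp [hx, Ne.symm hxy]
        · simp [hx, (show ¬ x = y from fun h => hxy h.symm)]

-- the B loop over a sentence produces the distinct words in first-occurrence order with their counts
theorem bump_fold (sent : List String) :
    sent.foldl pvBump [] =
      (PySem.Set.ofList sent).map (fun k => (k, (sent.count k : Int))) := by
  induction sent using List.reverseRecOn with
  | nil => simp [PySem.Set.ofList]
  | append_singleton l x ih =>
      rw [List.foldl_append, List.foldl_cons, List.foldl_nil, ih,
          bump_map _ _ _ (PySem.Set.nodup_ofList l)]
      have hof : PySem.Set.ofList (l ++ [x]) = PySem.Set.add (PySem.Set.ofList l) x := by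
        simp [PySem.Set.ofList_eq_foldl, List.foldl_append]
      by_cases hx : x ∈ l
      · have hmem : x ∈ PySem.Set.ofList l := (PySem.Set.mem_ofList l x).mpr hx
        rw [if_pos hmem, hof]
        have : PySem.Set.add (PySem.Set.ofList l) x = PySem.Set.ofList l := by
          simp [PySem.Set.add, PySem.Set.contains, hmem]
        rw [this]
        refine List.map_congr_left (fun k _ => ?_)
        by_cases hk : k = x
        · subst hk; simp [List.count_append]
        · simp [hk, List.count_append,
                (by simpa [eq_comm] using hk : ¬ (x = k))]
      · have hmem : x ∉ PySem.Set.ofList l := fun h => hx ((PySem.Set.mem_ofList l x).mp h)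
        rw [if_neg hmem, hof]
        have : PySem.Set.add (PySem.Set.ofList l) x = PySem.Set.ofList l ++ [x] := by
          simp [PySem.Set.add, PySem.Set.contains, hmem]
        rw [this, List.map_append]
        congr 1
        · refine List.map_congr_left (fun k hk => ?_)
          have : ¬ (x = k) := fun h => hmem (h ▸ hk)
          simp [List.count_append, this]
        · simp [List.count_append, List.count_singleton, List.count_eq_zero_of_not_mem hx]

-- per sentence, A's fresh-key insert loop over the set equals B's bump fold
theorem per_sentence_eq (sent : List String) :
    ((PySem.Set.ofList sent).foldl
       (fun d word => d.insert word (sent.count word : Int)) PySem.Dict.empty).items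
    = sent.foldl pvBump [] := by
  rw [bump_fold,
      PySem.Dict.items_foldl_insert_fresh (k := fun w => w)
        (v := fun w => (sent.count w : Int)) (l := PySem.Set.ofList sent) (d := PySem.Dict.empty)
        (fun a _ => PySem.Dict.contains_empty a)
        (by simp [PySem.Set.nodup_ofList sent])]
  simp [PySem.Dict.empty]

-- ===== VERDICT (by name: the statement is the Claim_ definition above) =====
theorem word_embedding_spec : Claim_equal_word_embedding := by
  intro X _
  show word_embedding X = word_embedding_alt X
  unfold word_embedding word_embedding_alt
  simp only [PySem.List.foldl_append_singleton_eq_map]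
  exact congrArg _ (List.map_congr_left (fun sent _ => per_sentence_eq sent))
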